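-- pv_equiv track=rewrite | github.com/alan-sultan/MyLeetCodes | 858-masking-personal-information/masking-personal-information.py | maskPII
-- ===== SOURCE A (Python) =====
-- def maskPII(s: str) -> str:
--     if '@' in s:
--         name, domain = s.split('@')
--         ans = name[0].lower() + "*" * 5 + name[-1].lower() + '@'
--         bdot, adot = domain.split('.')
--         ans += bdot.lower() +'.' + adot.lower()
--         return ans
--     nums =""
--     for num in s:
--         if num.isalnum():
--             nums += num
--     print
--     if len(nums) == 10:
--         return "***-***-" + nums[len(nums) - 4:]
--     if len(nums) == 11:
--         return "+*-***-***-" + nums[len(nums) - 4:]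
--     if len(nums) == 12:
--         return "+**-***-***-" + nums[len(nums) - 4:]
--     if len(nums) == 13:
--         return "+***-***-***-" + nums[len(nums) - 4:]
-- ===== SOURCE B (Python) =====
-- def maskPII(s: str) -> str:
--     if '@' in s:
--         t = s.lower()
--         i = t.index('@')
--         return t[0] + '*' * 5 + t[i - 1] + t[i:]
--     count = 0
--     last4 = []
--     for c in reversed(s):
--         if c.isalnum():
--             count += 1
--             if len(last4) < 4:
--                 last4.append(c)
--     if count < 10 or count > 13:
--         return None
--     prefix = '***-***-' if count == 10 else '+' + '*' * (count - 10) + '-***-***-'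
--     return prefix + ''.join(reversed(last4))
-- ===== Notes on version B (the rewrite author's own statement) =====
-- stated objective: alternative
-- what changed: B masks email by lowercasing the whole string once and slicing at the first '@' index (no split/rejoin of name and domain), and masks phone with a single reversed-order pass that keeps only a running count and the last four alphanumerics, instead of A's build-the-full-digit-string-then-branch-on-four-lengths.
-- outside the precondition, e.g. on maskPII('@'): A raises IndexError, B returns '@*****@@'
import Mathlib
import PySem

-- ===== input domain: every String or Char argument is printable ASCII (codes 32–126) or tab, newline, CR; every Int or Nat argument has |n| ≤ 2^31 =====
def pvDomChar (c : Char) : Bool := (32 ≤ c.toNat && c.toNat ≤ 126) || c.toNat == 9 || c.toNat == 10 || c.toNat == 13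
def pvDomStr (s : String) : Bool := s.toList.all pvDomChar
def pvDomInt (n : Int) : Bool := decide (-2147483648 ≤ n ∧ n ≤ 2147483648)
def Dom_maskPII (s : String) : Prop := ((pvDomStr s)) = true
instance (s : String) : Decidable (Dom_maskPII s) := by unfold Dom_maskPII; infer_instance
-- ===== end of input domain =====

-- B masks email by lowercasing the whole string once and slicing at the first '@' index, and masks
-- phone with a single reversed-order pass keeping a count and the last four alphanumerics
-- (objective: alternative decomposition, same asymptotic cost).

-- ===== PORT A =====
def maskPII (s : String) : Option String :=
  if PySem.Str.isIn "@" s = true then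
    match PySem.Chars.splitOn s.toList ['@'] with
    | [name, domain] =>
      match PySem.List.pyGet? name 0, PySem.List.pyGet? name (-1) with
      | some n0, some nl =>
        let ans := [PySem.Chars.lowerChar n0] ++ ['*','*','*','*','*'] ++ [PySem.Chars.lowerChar nl] ++ ['@']
        match PySem.Chars.splitOn domain ['.'] with
        | [bdot, adot] =>
            some (String.ofList (ans ++ PySem.Chars.lower bdot ++ ['.'] ++ PySem.Chars.lower adot))
        | _ => none          -- domain.split('.') does not unpack into two: ValueError
      | _, _ => none         -- name[0] / name[-1]: IndexError on empty name
    | _ => none              -- s.split('@') does not unpack into two: ValueError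
  else
    let nums := s.toList.foldl (fun acc c => if PySem.Chars.isalnum c = true then acc ++ [c] else acc) []
    if nums.length = 10 then
      some (String.ofList ("***-***-".toList ++ PySem.List.slice nums (some ((nums.length : Int) - 4)) none))
    else if nums.length = 11 then
      some (String.ofList ("+*-***-***-".toList ++ PySem.List.slice nums (some ((nums.length : Int) - 4)) none))
    else if nums.length = 12 then
      some (String.ofList ("+**-***-***-".toList ++ PySem.List.slice nums (some ((nums.length : Int) - 4)) none))
    else if nums.length = 13 then
      some (String.ofList ("+***-***-***-".toList ++ PySem.List.slice nums (some ((nums.length : Int) - 4)) none))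
    else none

-- ===== PORT B =====
def maskPII_alt (s : String) : Option String :=
  if PySem.Str.isIn "@" s = true then
    let t := PySem.Chars.lower s.toList
    match PySem.List.index? t '@' with           -- t.index('@'); the guard guarantees a hit
    | some i =>
        (PySem.List.pyGet? t 0).bind fun t0 =>
          (PySem.List.pyGet? t ((i : Int) - 1)).map fun tm =>
            String.ofList ([t0] ++ ['*','*','*','*','*'] ++ [tm] ++
              PySem.List.slice t (some (i : Int)) none)
    | none => none
  else
    let st := s.toList.reverse.foldl
      (fun (acc : List Char × Nat) c =>
        if PySem.Chars.isalnum c = true then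
          ((if acc.1.length < 4 then acc.1 ++ [c] else acc.1), acc.2 + 1)
        else acc) ([], 0)
    if st.2 < 10 ∨ 13 < st.2 then none
    else
      let pre : List Char :=
        if st.2 = 10 then "***-***-".toList
        else ['+'] ++ List.replicate (st.2 - 10) '*' ++ "-***-***-".toList
      some (String.ofList (pre ++ st.1.reverse))

-- ===== PRECONDITION & SPEC =====
-- Pre_ excludes exactly the inputs on which the Python A raises: strings whose at-sign split does
-- not give two parts, an empty local part (IndexError), or a domain whose dot split does not give
-- two parts.  It excludes no input on which A returns.
def Pre_maskPII (s : String) : Prop :=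
  PySem.Str.isIn "@" s = true →
    (PySem.Chars.splitOn s.toList ['@']).length = 2 ∧
    (PySem.Chars.splitOn s.toList ['@'])[0]! ≠ [] ∧
    (PySem.Chars.splitOn ((PySem.Chars.splitOn s.toList ['@'])[1]!) ['.']).length = 2
instance (s : String) : Decidable (Pre_maskPII s) := by unfold Pre_maskPII; infer_instance
def pvWitness_maskPII : String := "a@b.c"

def Spec_maskPII (s : String) (out : Option String) : Prop := out = maskPII_alt s
instance (s : String) (out : Option String) : Decidable (Spec_maskPII s out) := by unfold Spec_maskPII; infer_instance

-- ===== CLAIM (what is proved, stated in full; the proofs are below) =====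
def Claim_equal_maskPII : Prop := ∀ (s : String), Dom_maskPII s → Pre_maskPII s → Spec_maskPII s (maskPII s)

-- ===== LEMMAS AND PROOFS =====

-- reference single-separator split: structural recursion, used to reason about PySem's fuel-based splitOn
def splitF (c : Char) : List Char → List (List Char)
  | [] => [[]]
  | a :: t =>
    if a = c then [] :: splitF c t
    else
      match splitF c t with
      | h :: r => (a :: h) :: r
      | [] => [[a]]

theorem splitF_ne_nil (c : Char) (cs : List Char) : splitF c cs ≠ [] := by
  induction cs with
  | nil => simp [splitF]
  | cons a t ih =>
    simp only [splitF]
    split_ifs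
    · simp
    · cases h : splitF c t with
      | nil => exact absurd h ih
      | cons h' r' => simp

theorem go_eq (c : Char) :
    ∀ (cs : List Char) (h : List Char) (r : List (List Char)) (fuel : Nat) (cur : List Char)
      (acc : List (List Char)), splitF c cs = h :: r → cs.length < fuel →
      PySem.Chars.splitOn.go [c] fuel cs cur acc = acc.reverse ++ (cur.reverse ++ h) :: r := by
  intro cs
  induction cs with
  | nil =>
    intro h r fuel cur acc hs hf
    simp only [splitF] at hs
    obtain ⟨rfl, rfl⟩ : [] = h ∧ ([] : List (List Char)) = r := by simpa using hs
    obtain ⟨f, rfl⟩ : ∃ f, fuel = f + 1 := ⟨fuel - 1, by omega⟩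
    rw [PySem.Chars.splitOn.go.eq_def]
    simp
  | cons a t ih =>
    intro h r fuel cur acc hs hf
    obtain ⟨f, rfl⟩ : ∃ f, fuel = f + 1 := ⟨fuel - 1, by omega⟩
    rw [PySem.Chars.splitOn.go.eq_def]
    by_cases hac : c = a
    · subst hac
      simp only [splitF, if_pos] at hs
      obtain ⟨rfl, rfl⟩ : [] = h ∧ splitF c t = r := by
        exact ⟨(List.cons.injEq _ _ _ _).mp hs |>.1, (List.cons.injEq _ _ _ _).mp hs |>.2⟩
      obtain ⟨h', r', ht⟩ : ∃ h' r', splitF c t = h' :: r' := by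
        cases hsp : splitF c t with
        | nil => exact absurd hsp (splitF_ne_nil c t)
        | cons x y => exact ⟨x, y, rfl⟩
      have : List.isPrefixOf [c] (c :: t) = true := by simp [List.isPrefixOf]
      simp only [this, if_pos, List.length_cons, List.length_nil, List.drop_succ_cons, List.drop_zero]
      rw [ih h' r' f [] (cur.reverse :: acc) ht (by simp at hf; omega)]
      simp [ht]
    · have hne : (a = c) = False := by simp [Ne.symm hac]
      simp only [splitF, hne, if_false] at hs
      obtain ⟨h', r', ht⟩ : ∃ h' r', splitF c t = h' :: r' := by
        cases hsp : splitF c t with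
        | nil => exact absurd hsp (splitF_ne_nil c t)
        | cons x y => exact ⟨x, y, rfl⟩
      rw [ht] at hs
      obtain ⟨rfl, rfl⟩ : a :: h' = h ∧ r' = r :=
        ⟨(List.cons.injEq _ _ _ _).mp hs |>.1, (List.cons.injEq _ _ _ _).mp hs |>.2⟩
      have : List.isPrefixOf [c] (a :: t) = false := by simp [List.isPrefixOf, hac]
      simp only [this]
      rw [if_neg (by simp)]
      rw [ih h' r' f (a :: cur) acc ht (by simp at hf; omega)]
      simp

theorem splitOn_eq_splitF (c : Char) (cs : List Char) :
    PySem.Chars.splitOn cs [c] = splitF c cs := by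
  obtain ⟨h, r, ht⟩ : ∃ h r, splitF c cs = h :: r := by
    cases hsp : splitF c cs with
    | nil => exact absurd hsp (splitF_ne_nil c cs)
    | cons x y => exact ⟨x, y, rfl⟩
  unfold PySem.Chars.splitOn
  rw [go_eq c cs h r (cs.length + 1) [] [] ht (by omega), ht]
  simp

theorem splitF_singleton (c : Char) :
    ∀ (cs y : List Char), splitF c cs = [y] → cs = y := by
  intro cs
  induction cs with
  | nil => intro y h; simpa [splitF] using (by simpa [splitF] using h : [] = y)
  | cons a t ih =>
    intro y h
    by_cases hac : a = c
    · subst hac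
      simp only [splitF, if_pos] at h
      obtain ⟨-, h2⟩ := (List.cons.injEq _ _ _ _).mp h
      exact absurd h2.symm (by simpa using (splitF_ne_nil a t))
    · have hne : (a = c) = False := by simp [hac]
      simp only [splitF, hne, if_false] at h
      obtain ⟨h', r', ht⟩ : ∃ h' r', splitF c t = h' :: r' := by
        cases hsp : splitF c t with
        | nil => exact absurd hsp (splitF_ne_nil c t)
        | cons x y => exact ⟨x, y, rfl⟩
      rw [ht] at h
      obtain ⟨h1, h2⟩ := (List.cons.injEq _ _ _ _).mp h
      obtain ⟨rfl⟩ : r' = [] := by simpa using h2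
      rw [← h1, ih h' ht]

theorem splitF_pair (c : Char) :
    ∀ (cs x y : List Char), splitF c cs = [x, y] → cs = x ++ c :: y := by
  intro cs
  induction cs with
  | nil => intro x y h; simp [splitF] at h
  | cons a t ih =>
    intro x y h
    by_cases hac : a = c
    · subst hac
      simp only [splitF, if_pos] at h
      obtain ⟨h1, h2⟩ := (List.cons.injEq _ _ _ _).mp h
      rw [← h1]
      simpa using splitF_singleton a t y (by simpa using h2)
    · have hne : (a = c) = False := by simp [hac]
      simp only [splitF, hne, if_false] at h
      obtain ⟨h', r', ht⟩ : ∃ h' r', splitF c t = h' :: r' := by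
        cases hsp : splitF c t with
        | nil => exact absurd hsp (splitF_ne_nil c t)
        | cons x y => exact ⟨x, y, rfl⟩
      rw [ht] at h
      obtain ⟨h1, h2⟩ := (List.cons.injEq _ _ _ _).mp h
      subst h2
      rw [← h1]
      simpa using ih h' y ht

theorem splitF_head_notMem (c : Char) :
    ∀ (cs x : List Char) (r : List (List Char)), splitF c cs = x :: r → c ∉ x := by
  intro cs
  induction cs with
  | nil => intro x r h; obtain ⟨rfl, -⟩ := (List.cons.injEq _ _ _ _).mp (by simpa [splitF] using h); simp
  | cons a t ih =>
    intro x r h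
    by_cases hac : a = c
    · subst hac
      simp only [splitF, if_pos] at h
      obtain ⟨rfl, -⟩ := (List.cons.injEq _ _ _ _).mp h
      simp
    · have hne : (a = c) = False := by simp [hac]
      simp only [splitF, hne, if_false] at h
      obtain ⟨h', r', ht⟩ : ∃ h' r', splitF c t = h' :: r' := by
        cases hsp : splitF c t with
        | nil => exact absurd hsp (splitF_ne_nil c t)
        | cons x y => exact ⟨x, y, rfl⟩
      rw [ht] at h
      obtain ⟨h1, -⟩ := (List.cons.injEq _ _ _ _).mp h
      rw [← h1]
      intro hmem
      rcases List.mem_cons.mp hmem with rfl | hmem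
      · exact hac rfl
      · exact ih h' r' ht hmem

theorem splitOn_pair (c : Char) (cs x y : List Char)
    (h : PySem.Chars.splitOn cs [c] = [x, y]) : cs = x ++ c :: y ∧ c ∉ x := by
  rw [splitOn_eq_splitF] at h
  exact ⟨splitF_pair c cs x y h, splitF_head_notMem c cs x [y] h⟩

theorem foldl_filter (p : Char → Bool) :
    ∀ (l acc : List Char),
      l.foldl (fun acc c => if p c = true then acc ++ [c] else acc) acc = acc ++ l.filter p := by
  intro l
  induction l with
  | nil => intro acc; simp
  | cons a t ih =>
    intro acc
    simp only [List.foldl_cons, List.filter_cons]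
    by_cases hp : p a = true
    · rw [if_pos hp, hp, ih]; simp
    · rw [if_neg hp, ih]
      simp [hp]

-- the reversed phone pass computes (first four of the filtered reversal, filtered count)
theorem foldl_last4 (p : Char → Bool) :
    ∀ (l l4 : List Char) (n : Nat),
      l.foldl (fun (acc : List Char × Nat) c =>
          if p c = true then ((if acc.1.length < 4 then acc.1 ++ [c] else acc.1), acc.2 + 1)
          else acc) (l4, n) =
        (l4 ++ (l.filter p).take (4 - l4.length), n + (l.filter p).length) := by
  intro l
  induction l with
  | nil => intro l4 n; simp
  | cons a t ih =>
    intro l4 n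
    simp only [List.foldl_cons, List.filter_cons]
    by_cases hp : p a = true
    · rw [if_pos hp, hp]
      by_cases h4 : l4.length < 4
      · rw [if_pos h4, ih]
        have : 4 - l4.length = (4 - (l4 ++ [a]).length) + 1 := by simp; omega
        rw [this]
        simp [List.take_succ_cons]
        omega
      · rw [if_neg h4, ih]
        have h0 : 4 - l4.length = 0 := by omega
        simp [h0]
        omega
    · rw [if_neg hp, ih]
      simp [hp]

theorem lowerChar_ne_at (c : Char) (h : c ≠ '@') : PySem.Chars.lowerChar c ≠ '@' := by
  unfold PySem.Chars.lowerChar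
  split_ifs with hu
  · have hb : 65 ≤ c.toNat ∧ c.toNat ≤ 90 := by
      simp [PySem.Chars.isupper, Char.le_def] at hu; exact hu
    intro habs
    have h64 : ('@' : Char).toNat = 64 := by decide
    have := congrArg Char.toNat habs
    rw [Char.toNat_ofNat, if_pos (Or.inl (by omega)), h64] at this
    omega
  · exact h

theorem lower_notMem_at (name : List Char) (h : '@' ∉ name) :
    '@' ∉ PySem.Chars.lower name := by
  intro hm
  obtain ⟨c, hc, hlc⟩ := List.mem_map.mp (by simpa [PySem.Chars.lower] using hm)
  by_cases hca : c = '@'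
  · exact h (hca ▸ hc)
  · exact lowerChar_ne_at c hca hlc

@[simp] theorem lowerChar_at' : PySem.Chars.lowerChar '@' = '@' := by decide
@[simp] theorem lowerChar_dot' : PySem.Chars.lowerChar '.' = '.' := by decide

theorem tail4_eq (nums : List Char) (h : 10 ≤ nums.length) :
    PySem.List.slice nums (some ((nums.length : Int) - 4)) none = (nums.reverse.take 4).reverse := by
  rw [PySem.List.slice_from (xs := nums) (a := (nums.length : Int) - 4) (by omega),
    ← List.rtake_eq_reverse_take_reverse]
  unfold List.rtake
  congr 1
  omega

-- ===== VERDICT =====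
theorem maskPII_spec : Claim_equal_maskPII := by
  intro s _ hpre
  unfold Spec_maskPII maskPII maskPII_alt
  by_cases hat : PySem.Str.isIn "@" s = true
  · rw [if_pos hat, if_pos hat]
    obtain ⟨hlen, hname, hdot⟩ := hpre hat
    obtain ⟨name, domain, hnd⟩ := List.length_eq_two.mp hlen
    rw [hnd] at hname hdot ⊢
    simp only [List.getElem!_cons_zero, List.getElem!_cons_succ] at hname hdot
    obtain ⟨hs, hnm⟩ := splitOn_pair '@' s.toList name domain hnd
    obtain ⟨n0, tl, rfl⟩ := List.exists_cons_of_ne_nil hname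
    obtain ⟨bdot, adot, hba⟩ := List.length_eq_two.mp hdot
    obtain ⟨hdom, -⟩ := splitOn_pair '.' domain bdot adot hba
    -- A side
    have h0 : PySem.List.pyGet? (n0 :: tl) (0 : Int) = some n0 := by
      simp [PySem.List.pyGet?, PySem.List.pyIdx?]
    have hL : (n0 :: tl).getLast? = some ((n0 :: tl).getLast (by simp)) :=
      List.getLast?_eq_some_getLast (by simp)
    have hneg : PySem.List.pyGet? (n0 :: tl) (-1) = some ((n0 :: tl).getLast (by simp)) := by
      rw [PySem.List.pyGet?_neg_one, hL]
    -- B side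
    have ht : PySem.Chars.lower s.toList =
        PySem.Chars.lower (n0 :: tl) ++ '@' :: PySem.Chars.lower domain := by
      rw [hs]; simp [PySem.Chars.lower]
    have hidx : PySem.List.index? (PySem.Chars.lower s.toList) '@' = some (tl.length + 1) := by
      rw [(PySem.List.index?_eq_some_iff _ _ _)]
      exact ⟨PySem.Chars.lower (n0 :: tl), PySem.Chars.lower domain,
        by rw [ht], by simp [PySem.Chars.lower], lower_notMem_at _ hnm⟩
    have hlower : PySem.Chars.lower s.toList =
        PySem.Chars.lowerChar n0 :: (PySem.Chars.lower tl ++ '@' :: PySem.Chars.lower domain) := by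
      rw [ht]; simp [PySem.Chars.lower]
    have hb0 : PySem.List.pyGet? (PySem.Chars.lower s.toList) (0 : Int) =
        some (PySem.Chars.lowerChar n0) := by
      rw [hlower, PySem.List.pyGet?_zero_cons]
    have hcast : ((tl.length + 1 : Nat) : Int) - 1 = ((tl.length : Nat) : Int) := by push_cast; ring
    have hbm : PySem.List.pyGet? (PySem.Chars.lower s.toList) (((tl.length + 1 : Nat) : Int) - 1) =
        some (PySem.Chars.lowerChar ((n0 :: tl).getLast (by simp))) := by
      rw [hcast, PySem.List.pyGet?_natCast, ht]
      have hlt : tl.length < (PySem.Chars.lower (n0 :: tl)).length := by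
        simp [PySem.Chars.lower]
      rw [List.getElem?_append_left hlt]
      have : PySem.Chars.lower (n0 :: tl) = (n0 :: tl).map PySem.Chars.lowerChar := rfl
      rw [this, List.getElem?_map]
      have : (n0 :: tl)[tl.length]? = some ((n0 :: tl).getLast (by simp)) := by
        rw [List.getLast_eq_getElem]
        exact List.getElem?_eq_getElem (by simp)
      rw [this]
      rfl
    have hslice : PySem.List.slice (PySem.Chars.lower s.toList)
        (some ((tl.length + 1 : Nat) : Int)) none = '@' :: PySem.Chars.lower domain := by
      rw [PySem.List.slice_from_natCast, ht]
      have : (PySem.Chars.lower (n0 :: tl)).length = tl.length + 1 := by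
        simp [PySem.Chars.lower]
      rw [← this, List.drop_left]
    dsimp only
    rw [h0, hneg, hidx]
    dsimp only
    rw [hba, hb0, hbm]
    simp only [Option.map_some, Option.bind_some]
    rw [hslice, hdom]
    simp [PySem.Chars.lower]
  · rw [if_neg hat, if_neg hat]
    rw [foldl_filter, foldl_last4]
    simp only [List.nil_append, List.length_nil, Nat.sub_zero, Nat.zero_add, List.filter_reverse]
    set nums := s.toList.filter PySem.Chars.isalnum with hnums
    simp only [List.length_reverse]
    by_cases h10 : nums.length = 10
    · rw [if_pos h10, if_neg (by omega), if_pos (by omega), tail4_eq nums (by omega)]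
    · by_cases h11 : nums.length = 11
      · rw [if_neg h10, if_pos h11, if_neg (by omega), if_neg (by omega),
            tail4_eq nums (by omega), h11]
        have : (['+'] ++ List.replicate (11 - 10) '*' ++ "-***-***-".toList : List Char)
            = "+*-***-***-".toList := by decide
        rw [this]
      · by_cases h12 : nums.length = 12
        · rw [if_neg h10, if_neg h11, if_pos h12, if_neg (by omega), if_neg (by omega),
              tail4_eq nums (by omega), h12]
          have : (['+'] ++ List.replicate (12 - 10) '*' ++ "-***-***-".toList : List Char)
              = "+**-***-***-".toList := by decide
          rw [this]
        · by_cases h13 : nums.length = 13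
          · rw [if_neg h10, if_neg h11, if_neg h12, if_pos h13, if_neg (by omega),
                if_neg (by omega), tail4_eq nums (by omega), h13]
            have : (['+'] ++ List.replicate (13 - 10) '*' ++ "-***-***-".toList : List Char)
                = "+***-***-***-".toList := by decide
            rw [this]
          · rw [if_neg h10, if_neg h11, if_neg h12, if_neg h13, if_pos (by omega)]
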